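-- pv_equiv track=rewrite | github.com/hogan-tech/leetcode-solution | 3931-process-string-with-special-operations-i/3931-process-string-with-special-operations-i.py | processStr
-- ===== SOURCE A (Python) =====
-- def processStr(s: str) -> str:
--     result = ''
--     for c in s:
--         if c == '#':
--             result += result
--         elif c == '%':
--             result = result[::-1]
--         elif c == '*':
--             result = result[:-1]
--         else:
--             result += c
--
--     return result
-- ===== SOURCE B (Python) =====
-- def processStr(s: str) -> str:
--     # Two stacks with an implicit orientation: the current string is
--     # reversed(L) + R, so '%' is a swap, '*' a pop and a plain char an append.
--     L, R = [], []
--     for c in s: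
--         if c == '#':
--             R = R + L[::-1] + R
--         elif c == '%':
--             L, R = R, L
--         elif c == '*':
--             if R:
--                 R.pop()
--             elif L:
--                 R = L[::-1]
--                 L = []
--                 R.pop()
--         else:
--             R.append(c)
--     return ''.join(reversed(L)) + ''.join(R)
-- ===== Notes on version B (the rewrite author's own statement) =====
-- stated objective: alternative
-- what changed: Replaces A's immutable-string rebuilds (a full copy for every '%' reversal and '*' deletion) with two character stacks holding the string as reversed(L)+R, where '%' is a reference swap, '*' a pop, and plain characters an append; only '#' and an occasional rebalance copy data.
import Mathlib
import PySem

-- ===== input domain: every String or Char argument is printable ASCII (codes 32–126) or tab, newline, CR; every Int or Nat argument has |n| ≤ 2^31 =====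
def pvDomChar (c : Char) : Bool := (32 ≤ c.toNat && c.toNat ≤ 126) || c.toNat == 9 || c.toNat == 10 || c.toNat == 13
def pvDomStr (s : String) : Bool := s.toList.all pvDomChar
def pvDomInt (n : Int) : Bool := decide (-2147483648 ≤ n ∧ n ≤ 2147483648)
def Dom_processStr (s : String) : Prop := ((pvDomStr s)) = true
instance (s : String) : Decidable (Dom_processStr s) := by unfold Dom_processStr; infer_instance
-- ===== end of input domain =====

-- B replaces A's per-op string rebuilds ('%' reversal, '*' slice) with two
-- stacks representing the string as reversed(L)+R: '%' swaps, '*' pops.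

-- ===== PORT A =====
-- A's loop: result accumulates; '#' doubles, '%' takes result[::-1], '*' takes result[:-1].
def processStrAuxA : List Char → List Char → List Char
  | [], result => result
  | c :: rest, result =>
    processStrAuxA rest
      (if c = '#' then result ++ result
       else if c = '%' then (PySem.List.slice? result none none (-1)).getD []
       else if c = '*' then PySem.List.slice result none (some (-1))
       else result ++ [c])

def processStr (s : String) : String := String.ofList (processStrAuxA s.toList [])

-- ===== PORT B =====
-- B's loop over the pair of stacks (L, R); the string so far is L.reverse ++ R.
def processStrAuxB : List Char → List Char × List Char → List Char × List Char
  | [], (L, R) => (L, R)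
  | c :: rest, (L, R) =>
    processStrAuxB rest
      (if c = '#' then (L, R ++ L.reverse ++ R)
       else if c = '%' then (R, L)
       else if c = '*' then
         (if R ≠ [] then (L, R.dropLast)
          else if L ≠ [] then ([], L.reverse.dropLast)
          else (L, R))
       else (L, R ++ [c]))

def processStr_alt (s : String) : String :=
  let p := processStrAuxB s.toList ([], [])
  String.ofList (p.1.reverse ++ p.2)

-- ===== PRECONDITION & SPEC =====
def Spec_processStr (s : String) (out : String) : Prop := out = processStr_alt s
instance (s : String) (out : String) : Decidable (Spec_processStr s out) := by unfold Spec_processStr; infer_instance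

-- ===== CLAIM (what is proved, stated in full; the proofs are below) =====
def Claim_equal_processStr : Prop := ∀ (s : String), Dom_processStr s → Spec_processStr s (processStr s)

-- ===== LEMMAS AND PROOFS =====

-- Invariant: A's accumulator is always reversed(L) ++ R of B's pair of stacks.
theorem auxA_eq_auxB (cs : List Char) (L R : List Char) :
    processStrAuxA cs (L.reverse ++ R) =
      (let p := processStrAuxB cs (L, R); p.1.reverse ++ p.2) := by
  induction cs generalizing L R with
  | nil => simp [processStrAuxA, processStrAuxB]
  | cons c rest ih =>
    by_cases h1 : c = '#'
    · have : (L.reverse ++ R) ++ (L.reverse ++ R) = L.reverse ++ (R ++ L.reverse ++ R) := by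
        simp
      simp [processStrAuxA, processStrAuxB, h1, this, ih]
    · by_cases h2 : c = '%'
      · have : (PySem.List.slice? (L.reverse ++ R) none none (-1)).getD [] =
            R.reverse ++ L := by
          rw [PySem.List.slice?_none_none_neg_one]; simp
        simp only [processStrAuxA, processStrAuxB, h2, if_true, this]
        exact ih R L
      · by_cases h3 : c = '*'
        · have hsl : PySem.List.slice (L.reverse ++ R) none (some (-1)) =
              (L.reverse ++ R).dropLast := PySem.List.slice_to_neg_one _
          rcases eq_or_ne R [] with hR | hR
          · subst hR
            rcases eq_or_ne L [] with hL | hL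
            · subst hL
              simpa [processStrAuxA, processStrAuxB, h1, h2, h3, hsl] using ih [] []
            · have hd : (L.reverse ++ ([] : List Char)).dropLast =
                  ([] : List Char).reverse ++ L.reverse.dropLast := by simp
              simp only [processStrAuxA, processStrAuxB, h2, h3, hL,
                ne_eq, not_true_eq_false, not_false_eq_true, if_false, hsl, hd]
              exact ih [] L.reverse.dropLast
          · have hd : (L.reverse ++ R).dropLast = L.reverse ++ R.dropLast := by
              rw [List.dropLast_append_of_ne_nil hR]
            simp only [processStrAuxA, processStrAuxB, h3, hR,
              ne_eq, not_false_eq_true, if_true, hsl, hd]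
            exact ih L R.dropLast
        · have : (L.reverse ++ R) ++ [c] = L.reverse ++ (R ++ [c]) := by simp
          simp only [processStrAuxA, processStrAuxB, h1, h2, h3, if_false, this]
          exact ih L (R ++ [c])

-- ===== VERDICT (by name: the statement is the Claim_ definition above) =====
theorem processStr_spec : Claim_equal_processStr := by
  intro s _
  unfold Spec_processStr processStr processStr_alt
  have := auxA_eq_auxB s.toList [] []
  simp only [List.reverse_nil, List.nil_append] at this
  rw [this]
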